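-- pv_equiv track=rewrite | github.com/Brunaaw/Algo2 | week-4/string.py | max_distinct_substring
-- ===== SOURCE A (Python) =====
-- def longest_unique_substring(s):
--     """ Retorna o tamanho da maior substring com caracteres distintos usando Janela Deslizante (O(N)) """
--     seen = set()
--     left = 0
--     max_length = 0
--
--     for right in range(len(s)):
--         while s[right] in seen:
--             seen.remove(s[left])
--             left += 1
--         seen.add(s[right])
--         max_length = max(max_length, right - left + 1)
--
--         # Se j치 atingimos o m치ximo de 20 caracteres distintos, podemos parar
--         if max_length == 20:
--             return max_length
--
--     return max_length
--
-- def max_distinct_substring(s):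
--     """ Maximiza a substring com caracteres distintos ap칩s inverter no m치ximo um trecho (O(N^2) otimizado) """
--     n = len(s)
--
--     max_len = longest_unique_substring(s)
--
--     if max_len == 20:
--         return max_len
--
--     for i in range(n):
--         for j in range(i + 1, n):
--             new_s = s[:i] + s[i:j+1][::-1] + s[j+1:]
--
--             new_max = longest_unique_substring(new_s)
--
--             max_len = max(max_len, new_max)
--
--             if max_len == 20:
--                 return max_len
--
--     return max_len
-- ===== SOURCE B (Python) =====
-- def max_distinct_substring(s):
--     """Same answer as trying every single contiguous reversal: a reversal can
--     splice any two position-disjoint distinct-char blocks together, so the answer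
--     is the largest total size of two disjoint distinct-char intervals with
--     disjoint character sets, capped at 20, found directly in O(n^2)."""
--     n = len(s)
--     best = 0
--     for a in range(n):
--         used = set()
--         b = a
--         while b < n and s[b] not in used:
--             used.add(s[b])
--             b += 1
--             length1 = b - a
--             if length1 > best:
--                 best = length1
--             if best >= 20:
--                 return 20
--             for c in range(b, n):
--                 seen = set(used)
--                 run = 0
--                 while c + run < n and s[c + run] not in seen:
--                     seen.add(s[c + run])
--                     run += 1
--                 if length1 + run > best:
--                     best = length1 + run
--                 if best >= 20:
--                     return 20
--     return min(best, 20)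
-- ===== Notes on version B (the rewrite author's own statement) =====
-- stated objective: faster
-- what changed: Instead of materialising every one of the O(n^2) block-reversed strings and running a sliding window over each (O(n^3)), B uses the fact that one contiguous reversal can splice together exactly the pairs of position-disjoint distinct-character blocks, and directly searches for the best pair of disjoint distinct intervals with disjoint character sets (with the same early exit at the cap of 20).
import Mathlib
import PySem

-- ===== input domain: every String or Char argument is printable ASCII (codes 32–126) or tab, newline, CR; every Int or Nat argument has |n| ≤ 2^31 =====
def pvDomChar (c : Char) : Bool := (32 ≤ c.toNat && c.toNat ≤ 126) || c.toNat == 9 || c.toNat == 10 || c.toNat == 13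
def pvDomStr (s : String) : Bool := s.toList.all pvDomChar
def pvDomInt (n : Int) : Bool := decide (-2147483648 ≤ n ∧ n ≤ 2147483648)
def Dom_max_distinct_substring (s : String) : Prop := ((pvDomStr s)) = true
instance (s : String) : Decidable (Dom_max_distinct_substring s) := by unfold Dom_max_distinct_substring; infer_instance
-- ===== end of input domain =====

-- B replaces A's "materialise every block-reversed string and slide a window over it" search by a
-- direct search for the best pair of position-disjoint distinct-character intervals with disjoint
-- character sets (one contiguous reversal can splice exactly those pairs together); same values,
-- same cap at 20.

-- ===== PORT A =====
-- All indexing in A is on in-range indices (the loop guards ensure it), so `List.getD _ _ ' '`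
-- is exact for Python's `s[k]`.  Loops are ported as structural recursions over the index lists;
-- the two `while` loops carry a fuel argument that is large enough on every reachable state and
-- exists only to make the recursion structural.

-- `while s[right] in seen: seen.remove(s[left]); left += 1` — the removed element is always a
-- member (seen holds exactly the window's characters), so `discard` is exact for `remove`.
def lusShrink (l : List Char) (c : Char) : PySem.Set Char → Nat → Nat → PySem.Set Char × Nat
  | seen, left, 0 => (seen, left)
  | seen, left, fuel + 1 =>
    if PySem.Set.contains seen c then
      lusShrink l c (PySem.Set.discard seen (l.getD left ' ')) (left + 1) fuel
    else (seen, left)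

-- `for right in range(len(s))` of longest_unique_substring, early `return max_length` at 20.
def lusLoop (l : List Char) : List Nat → PySem.Set Char → Nat → Nat → Nat
  | [], _, _, maxlen => maxlen
  | r :: rs, seen, left, maxlen =>
    let c := l.getD r ' '
    let p := lusShrink l c seen left (r + 1 - left)
    let seen' := PySem.Set.add p.1 c
    let maxlen' := max maxlen (r + 1 - p.2)
    if maxlen' = 20 then 20 else lusLoop l rs seen' p.2 maxlen'

def lusList (l : List Char) : Nat := lusLoop l (List.range l.length) PySem.Set.empty 0 0

-- new_s = s[:i] + s[i:j+1][::-1] + s[j+1:]; 0 ≤ i < j+1 ≤ n, so the slices are these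
-- takes/drops (PySem.List.slice_to_natCast / slice_natCast / slice_from_natCast) and
-- [::-1] is List.reverse (PySem.List.slice?_none_none_neg_one).
def surgery (l : List Char) (i j : Nat) : List Char :=
  l.take i ++ ((l.take (j + 1)).drop i).reverse ++ l.drop (j + 1)

-- inner `for j in range(i+1, n)`; `if max_len == 20: return max_len` is the early exit.
def aInner (l : List Char) (i : Nat) : List Nat → Nat → Nat
  | [], maxlen => maxlen
  | j :: js, maxlen =>
    let newmax := lusList (surgery l i j)
    let maxlen' := max maxlen newmax
    if maxlen' = 20 then 20 else aInner l i js maxlen'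

-- outer `for i in range(n)`.  The Python early-returns 20 from inside the inner loop; the inner
-- port returns 20 exactly in those runs (20 can never be the value of a normally finished inner
-- loop that was entered with max_len ≠ 20), so testing the returned value is exact.
def aOuter (l : List Char) : List Nat → Nat → Nat
  | [], maxlen => maxlen
  | i :: is, maxlen =>
    let m := aInner l i (List.range' (i + 1) (l.length - (i + 1))) maxlen
    if m = 20 then 20 else aOuter l is m

def max_distinct_substring (s : String) : Int :=
  let l := s.toList
  let maxlen := lusList l
  ((if maxlen = 20 then 20 else aOuter l (List.range l.length) maxlen : Nat) : Int)

-- ===== PORT B =====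
-- Port of Source B, same conventions: in-range indexing via getD, while-loops as fuel recursions,
-- early `return 20` surfaced as the value 20 (a loop entered with best < 20 can only yield 20
-- by taking an early return, since every update of best is followed by the ≥ 20 test).

-- `while c + run < n and s[c+run] not in seen: …`
def bRun (l : List Char) (c : Nat) : PySem.Set Char → Nat → Nat → Nat
  | _, run, 0 => run
  | seen, run, fuel + 1 =>
    if c + run < l.length then
      let ch := l.getD (c + run) ' '
      if PySem.Set.contains seen ch then run
      else bRun l c (PySem.Set.add seen ch) (run + 1) fuel
    else run

-- `for c in range(b, n)` with its two updates and the early exit.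
def bPair (l : List Char) (length1 : Nat) (used : PySem.Set Char) : List Nat → Nat → Nat
  | [], best => best
  | c :: cs, best =>
    let run := bRun l c used 0 (l.length - c)
    let best' := if length1 + run > best then length1 + run else best
    if 20 ≤ best' then 20 else bPair l length1 used cs best'

-- `while b < n and s[b] not in used: …` (the first-interval extension loop).
def bExtend (l : List Char) (a : Nat) : PySem.Set Char → Nat → Nat → Nat → Nat
  | _, _, best, 0 => best
  | used, b, best, fuel + 1 =>
    if b < l.length then
      let ch := l.getD b ' '
      if PySem.Set.contains used ch then best
      else
        let used' := PySem.Set.add used ch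
        let length1 := b + 1 - a
        let best1 := if length1 > best then length1 else best
        if 20 ≤ best1 then 20 else
          let best2 := bPair l length1 used' (List.range' (b + 1) (l.length - (b + 1))) best1
          if best2 = 20 then 20 else bExtend l a used' (b + 1) best2 fuel
    else best

-- `for a in range(n)`.
def bOuter (l : List Char) : List Nat → Nat → Nat
  | [], best => best
  | a :: as_, best =>
    let best' := bExtend l a PySem.Set.empty a best (l.length - a)
    if best' = 20 then 20 else bOuter l as_ best'

def max_distinct_substring_alt (s : String) : Int :=
  let l := s.toList
  let best := bOuter l (List.range l.length) 0
  ((min best 20 : Nat) : Int)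

-- ===== PRECONDITION & SPEC =====
def Spec_max_distinct_substring (s : String) (out : Int) : Prop := out = max_distinct_substring_alt s
instance (s : String) (out : Int) : Decidable (Spec_max_distinct_substring s out) := by unfold Spec_max_distinct_substring; infer_instance

-- ===== CLAIM (what is proved, stated in full; the proofs are below) =====
def Claim_equal_max_distinct_substring : Prop := ∀ (s : String), Dom_max_distinct_substring s → Spec_max_distinct_substring s (max_distinct_substring s)

-- ===== LEMMAS AND PROOFS =====

-- ---------- segments: seg l a b is the Python slice l[a:b] (for a ≤ b ≤ |l|) ----------
def seg {α : Type} (l : List α) (a b : Nat) : List α := (l.take b).drop a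

theorem seg_nil {α : Type} (l : List α) {a b : Nat} (h : b ≤ a) : seg l a b = [] := by
  apply List.drop_eq_nil_of_le
  exact le_trans (by simpa using List.length_take_le b l) h

theorem seg_length {α : Type} (l : List α) {a b : Nat} (h : b ≤ l.length) :
    (seg l a b).length = b - a := by
  simp [seg, Nat.min_eq_left h]

theorem seg_getElem {α : Type} (l : List α) {a b k : Nat} (h1 : a + k < b) (h2 : b ≤ l.length)
    (hk : k < (seg l a b).length) : (seg l a b)[k] = l[a + k]'(lt_of_lt_of_le h1 h2) := by
  simp [seg]

theorem seg_zero_length {α : Type} (l : List α) : seg l 0 l.length = l := by simp [seg]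

theorem seg_cons {α : Type} (l : List α) {a b : Nat} (h1 : a < b) (h2 : b ≤ l.length) :
    seg l a b = l[a]'(lt_of_lt_of_le h1 h2) :: seg l (a + 1) b := by
  have ha : a < (l.take b).length := by simp [Nat.min_eq_left h2]; omega
  rw [seg, List.drop_eq_getElem_cons ha]
  simp [seg]

theorem seg_snoc {α : Type} (l : List α) {a b : Nat} (h1 : a ≤ b) (h2 : b < l.length) :
    seg l a (b + 1) = seg l a b ++ [l[b]] := by
  rw [seg, List.take_succ, List.drop_append_of_le_length (by simp; omega)]
  simp [seg, List.getElem?_eq_getElem h2]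

theorem seg_split {α : Type} (l : List α) {a m b : Nat} (h1 : a ≤ m) (h2 : m ≤ b)
    (h3 : b ≤ l.length) : seg l a b = seg l a m ++ seg l m b := by
  have : l.take b = l.take m ++ seg l m b := by
    conv_lhs => rw [← List.take_append_drop m (l.take b)]
    rw [List.take_take, Nat.min_eq_left h2]
    rfl
  rw [seg, this, List.drop_append_of_le_length (by simp; omega)]
  rfl

theorem getElem_mem_seg {α : Type} (l : List α) {a k b : Nat} (h1 : a ≤ k) (h2 : k < b)
    (h3 : b ≤ l.length) : l[k]'(lt_of_lt_of_le h2 h3) ∈ seg l a b := by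
  obtain ⟨d, rfl⟩ := Nat.exists_eq_add_of_le h1
  have hk : d < (seg l a b).length := by rw [seg_length l h3]; omega
  have := seg_getElem l (a := a) (b := b) (k := d) (by omega) h3 hk
  rw [← this]
  exact List.getElem_mem hk

theorem nodup_seg_mono {α : Type} (l : List α) {a a' b' b : Nat} (h1 : a ≤ a') (h2 : b' ≤ b)
    (h3 : b ≤ l.length) (hnd : (seg l a b).Nodup) : (seg l a' b').Nodup := by
  by_cases hab : b' ≤ a'
  · rw [seg_nil l hab]; exact List.nodup_nil
  · push_neg at hab
    have : seg l a b = seg l a a' ++ (seg l a' b' ++ seg l b' b) := by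
      rw [← seg_split l (by omega) (by omega) h3, ← seg_split l h1 (by omega) h3]
    rw [this] at hnd
    exact ((hnd.of_append_right).of_append_left)

theorem seg_append_left {α : Type} (u w : List α) {a b : Nat} (h : b ≤ u.length) :
    seg (u ++ w) a b = seg u a b := by
  rw [seg, List.take_append_of_le_length h]; rfl

theorem seg_append_right {α : Type} (u w : List α) {a b : Nat} (h : u.length ≤ a) :
    seg (u ++ w) a b = seg w (a - u.length) (b - u.length) := by
  by_cases hb : b ≤ u.length
  · rw [seg_nil _ (by omega), seg_nil _ (by omega)]
  · push_neg at hb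
    rw [seg, List.take_append, List.drop_append, List.take_of_length_le (by omega),
      List.drop_of_length_le (by omega)]
    simp [seg]

theorem seg_append_mid {α : Type} (u w : List α) {a b : Nat} (h1 : a ≤ u.length)
    (h2 : u.length ≤ b) (h3 : b ≤ u.length + w.length) :
    seg (u ++ w) a b = seg u a u.length ++ seg w 0 (b - u.length) := by
  rw [seg_split (u ++ w) h1 h2 (by simpa using h3), seg_append_left u w le_rfl,
    seg_append_right u w le_rfl]
  simp

theorem seg_reverse {α : Type} (v : List α) {a b : Nat} (h1 : a ≤ b) (h2 : b ≤ v.length) :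
    seg v.reverse a b = (seg v (v.length - b) (v.length - a)).reverse := by
  have hlen : (v.drop (v.length - b)).length - a = v.length - a - (v.length - b) := by
    rw [List.length_drop]; omega
  rw [seg, List.take_reverse, List.drop_reverse, seg, List.drop_take, hlen]

-- ---------- the common value both programs compute ----------
-- okPair l a b c d: two position-disjoint blocks l[a:b] and l[c:d], each of distinct
-- characters, with disjoint character sets.  Sd l v: v is the total size of such a pair.
def okPair (l : List Char) (a b c d : Nat) : Prop :=
  a ≤ b ∧ b ≤ c ∧ c ≤ d ∧ d ≤ l.length ∧ (seg l a b).Nodup ∧ (seg l c d).Nodup ∧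
    ∀ x ∈ seg l a b, x ∉ seg l c d

def Sd (l : List Char) (v : Nat) : Prop :=
  ∃ a b c d, okPair l a b c d ∧ v = (b - a) + (d - c)

theorem Sd_zero (l : List Char) : Sd l 0 :=
  ⟨0, 0, 0, 0, ⟨le_rfl, le_rfl, le_rfl, Nat.zero_le _, by simp [seg_nil], by simp [seg_nil],
    by simp [seg_nil l le_rfl]⟩, rfl⟩

theorem Sd_single (l : List Char) {p q : Nat} (h1 : p ≤ q) (h2 : q ≤ l.length)
    (h3 : (seg l p q).Nodup) : Sd l (q - p) :=
  ⟨p, q, q, q, ⟨h1, le_rfl, le_rfl, h2, h3, by simp [seg_nil], by simp [seg_nil l le_rfl]⟩,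
    by omega⟩

-- ---------- folding max with f ----------
theorem foldl_max_ge_init (f : Nat → Nat) : ∀ (xs : List Nat) (m : Nat),
    m ≤ xs.foldl (fun acc x => max acc (f x)) m
  | [], m => le_rfl
  | x :: xs, m => le_trans (le_max_left m (f x)) (foldl_max_ge_init f xs _)

theorem foldl_max_ge_elem (f : Nat → Nat) : ∀ (xs : List Nat) (m x : Nat), x ∈ xs →
    f x ≤ xs.foldl (fun acc x => max acc (f x)) m
  | y :: xs, m, x, hx => by
    rcases List.mem_cons.mp hx with rfl | hx
    · exact le_trans (le_max_right m (f x)) (foldl_max_ge_init f xs _)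
    · exact foldl_max_ge_elem f xs _ x hx

theorem foldl_max_le (f : Nat → Nat) {K : Nat} : ∀ (xs : List Nat) (m : Nat), m ≤ K →
    (∀ x ∈ xs, f x ≤ K) → xs.foldl (fun acc x => max acc (f x)) m ≤ K
  | [], m, hm, _ => hm
  | x :: xs, m, hm, h => by
    exact foldl_max_le f xs _ (max_le hm (h x (by simp)))
      (fun y hy => h y (by simp [hy]))

theorem foldl_max_eq_or (f : Nat → Nat) : ∀ (xs : List Nat) (m : Nat),
    xs.foldl (fun acc x => max acc (f x)) m = m ∨
      ∃ x ∈ xs, xs.foldl (fun acc x => max acc (f x)) m = f x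
  | [], m => Or.inl rfl
  | x :: xs, m => by
    rcases foldl_max_eq_or f xs (max m (f x)) with h | ⟨y, hy, h⟩
    · rcases max_cases m (f x) with ⟨he, _⟩ | ⟨he, _⟩
      · exact Or.inl (by simpa [List.foldl_cons, he] using h)
      · exact Or.inr ⟨x, by simp, by simpa [List.foldl_cons, he] using h⟩
    · exact Or.inr ⟨y, by simp [hy], by simpa [List.foldl_cons] using h⟩


-- ---------- the sliding window of longest_unique_substring ----------
theorem lusShrink_spec (l : List Char) {r : Nat} (hr : r < l.length) :
    ∀ (fuel : Nat) (seen : PySem.Set Char) (left : Nat), left ≤ r → r - left < fuel →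
    (∀ x, x ∈ seen ↔ x ∈ seg l left r) → (seg l left r).Nodup →
    ∃ seen' left', lusShrink l l[r] seen left fuel = (seen', left') ∧
      left ≤ left' ∧ left' ≤ r ∧ (∀ x, x ∈ seen' ↔ x ∈ seg l left' r) ∧
      (seg l left' r).Nodup ∧ l[r] ∉ seen' ∧
      ∀ p, left ≤ p → p < left' → l[r] ∈ seg l p r := by
  intro fuel
  induction fuel with
  | zero => intro seen left h1 h2; omega
  | succ fuel ih =>
    intro seen left h1 h2 hmem hnd
    by_cases hc : PySem.Set.contains seen l[r] = true
    · have hcin : l[r] ∈ seg l left r := (hmem _).mp ((PySem.Set.contains_iff _ _).mp hc)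
      have hlr : left < r := by
        by_contra hle
        rw [seg_nil l (by omega)] at hcin
        exact absurd hcin (List.not_mem_nil)
      have hgd : l.getD left ' ' = l[left]'(by omega) := List.getD_eq_getElem l ' ' (by omega)
      have hcons := seg_cons l hlr (le_of_lt hr)
      have hmem' : ∀ x, x ∈ PySem.Set.discard seen (l.getD left ' ') ↔ x ∈ seg l (left + 1) r := by
        intro x
        rw [PySem.Set.mem_discard, hgd, hmem]
        rw [hcons] at hnd ⊢
        simp only [List.mem_cons]
        constructor
        · rintro ⟨hx | hx, hne⟩
          · exact absurd hx hne
          · exact hx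
        · intro hx
          refine ⟨Or.inr hx, ?_⟩
          rintro rfl
          exact (List.nodup_cons.mp hnd).1 hx
      have hnd' : (seg l (left + 1) r).Nodup := by
        rw [hcons] at hnd; exact (List.nodup_cons.mp hnd).2
      obtain ⟨seen', left', heq, ha, hb', hm, hn, hno, hbet⟩ :=
        ih (PySem.Set.discard seen (l.getD left ' ')) (left + 1) (by omega) (by omega) hmem' hnd'
      refine ⟨seen', left', ?_, by omega, hb', hm, hn, hno, ?_⟩
      · rw [lusShrink, if_pos hc]; exact heq
      · intro p hp1 hp2
        rcases Nat.eq_or_lt_of_le hp1 with rfl | hlt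
        · exact hcin
        · exact hbet p (by omega) hp2
    · refine ⟨seen, left, ?_, le_rfl, h1, hmem, hnd, ?_, ?_⟩
      · rw [lusShrink, if_neg hc]
      · intro hin
        exact hc ((PySem.Set.contains_iff _ _).mpr hin)
      · intro p hp1 hp2
        omega

theorem lusLoop_spec (l : List Char) : ∀ (k : Nat), ∀ (r : Nat) (seen : PySem.Set Char)
    (left maxlen : Nat), r + k = l.length → left ≤ r →
    (∀ x, x ∈ seen ↔ x ∈ seg l left r) → (seg l left r).Nodup →
    (∀ p, p < left → ¬ (seg l p r).Nodup) →
    r - left ≤ maxlen → maxlen < 20 →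
    (∃ p q, p ≤ q ∧ q ≤ r ∧ (seg l p q).Nodup ∧ maxlen = q - p) →
    (∀ p q, p ≤ q → q ≤ r → (seg l p q).Nodup → q - p ≤ maxlen) →
    (∃ p q, p ≤ q ∧ q ≤ l.length ∧ (seg l p q).Nodup ∧
       lusLoop l (List.range' r k) seen left maxlen = min 20 (q - p)) ∧
    (∀ p q, p ≤ q → q ≤ l.length → (seg l p q).Nodup →
       min 20 (q - p) ≤ lusLoop l (List.range' r k) seen left maxlen) := by
  intro k
  induction k with
  | zero =>
    intro r seen left maxlen hrk h1 hmem hnd hmin hwin hm20 hsnd hcmp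
    have hr : r = l.length := by omega
    subst hr
    obtain ⟨p, q, hp, hq, hnpq, hval⟩ := hsnd
    simp only [List.range', lusLoop]
    constructor
    · exact ⟨p, q, hp, by omega, hnpq, by omega⟩
    · intro p' q' hp' hq' hn'
      have := hcmp p' q' hp' (by omega) hn'
      omega
  | succ k ih =>
    intro r seen left maxlen hrk h1 hmem hnd hmin hwin hm20 hsnd hcmp
    have hr : r < l.length := by omega
    have hgd : l.getD r ' ' = l[r] := List.getD_eq_getElem l ' ' hr
    obtain ⟨seen', left', heq, ha, hb', hm, hn, hno, hbet⟩ :=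
      lusShrink_spec l hr (r + 1 - left) seen left h1 (by omega) hmem hnd
    have hsnoc : seg l left' (r + 1) = seg l left' r ++ [l[r]] := seg_snoc l hb' hr
    have hnotin : l[r] ∉ seg l left' r := fun hx => hno ((hm _).mpr hx)
    have hndw : (seg l left' (r + 1)).Nodup := by
      rw [hsnoc, List.nodup_append]
      refine ⟨hn, List.nodup_singleton _, ?_⟩
      intro x hx y hy
      rw [List.mem_singleton] at hy
      subst hy
      intro hEq
      exact hnotin (hEq ▸ hx)
    have hmem' : ∀ x, x ∈ PySem.Set.add seen' l[r] ↔ x ∈ seg l left' (r + 1) := by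
      intro x
      rw [PySem.Set.mem_add, hsnoc, List.mem_append, hm]
      simp
    have hmin' : ∀ p, p < left' → ¬ (seg l p (r + 1)).Nodup := by
      intro p hp hcon
      have hpr : p ≤ r := by omega
      have hps : seg l p (r + 1) = seg l p r ++ [l[r]] := seg_snoc l hpr hr
      rw [hps, List.nodup_append] at hcon
      by_cases hpl : p < left
      · exact hmin p hpl hcon.1
      · have hinp : l[r] ∈ seg l p r := hbet p (by omega) hp
        exact hcon.2.2 _ hinp _ (by simp) rfl
    have hwin' : r + 1 - left' ≤ max maxlen (r + 1 - left') := le_max_right _ _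
    have hstep : r + 1 - left' ≤ 20 := by
      have : r - left ≤ maxlen := hwin
      omega
    have hrange : List.range' r (k + 1) = r :: List.range' (r + 1) k := by
      rw [List.range'_succ]
    rw [hrange]
    simp only [lusLoop, hgd, heq]
    by_cases h20 : max maxlen (r + 1 - left') = 20
    · rw [if_pos h20]
      have hwl : r + 1 - left' = 20 := by
        rcases max_choice maxlen (r + 1 - left') with he | he <;> omega
      constructor
      · exact ⟨left', r + 1, by omega, by omega, hndw, by omega⟩
      · intro p q hp hq hn'
        omega
    · rw [if_neg h20]
      have hm20' : max maxlen (r + 1 - left') < 20 := by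
        rcases max_choice maxlen (r + 1 - left') with he | he <;> omega
      have hsnd' : ∃ p q, p ≤ q ∧ q ≤ r + 1 ∧ (seg l p q).Nodup ∧
          max maxlen (r + 1 - left') = q - p := by
        rcases max_choice maxlen (r + 1 - left') with he | he
        · obtain ⟨p, q, hp, hq, hnpq, hval⟩ := hsnd
          exact ⟨p, q, hp, by omega, hnpq, by omega⟩
        · exact ⟨left', r + 1, by omega, by omega, hndw, by omega⟩
      have hcmp' : ∀ p q, p ≤ q → q ≤ r + 1 → (seg l p q).Nodup →
          q - p ≤ max maxlen (r + 1 - left') := by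
        intro p q hp hq hn'
        by_cases hqr : q ≤ r
        · have := hcmp p q hp hqr hn'
          omega
        · have hq1 : q = r + 1 := by omega
          subst hq1
          have hpl : left' ≤ p := by
            by_contra hpl
            exact hmin' p (by omega) hn'
          omega
      exact ih (r + 1) (PySem.Set.add seen' l[r]) left' (max maxlen (r + 1 - left'))
        (by omega) (by omega) hmem' hndw hmin' hwin' hm20' hsnd' hcmp'

theorem lus_spec (l : List Char) :
    (∃ p q, p ≤ q ∧ q ≤ l.length ∧ (seg l p q).Nodup ∧ lusList l = min 20 (q - p)) ∧
    (∀ p q, p ≤ q → q ≤ l.length → (seg l p q).Nodup → min 20 (q - p) ≤ lusList l) := by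
  have h0 : seg l 0 0 = [] := seg_nil l le_rfl
  have hm : ∀ x : Char, x ∈ PySem.Set.empty ↔ x ∈ seg l 0 0 := by
    intro x
    rw [h0]
    simp [PySem.Set.empty]
  have hn : (seg l 0 0).Nodup := by rw [h0]; exact List.nodup_nil
  have hs : ∃ p q, p ≤ q ∧ q ≤ 0 ∧ (seg l p q).Nodup ∧ 0 = q - p :=
    ⟨0, 0, le_rfl, le_rfl, hn, rfl⟩
  have hc : ∀ p q, p ≤ q → q ≤ 0 → (seg l p q).Nodup → q - p ≤ 0 := by
    intro p q hp hq _
    omega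
  have := lusLoop_spec l l.length 0 PySem.Set.empty 0 0 (by omega) le_rfl hm hn
    (by intro p hp; omega) (by omega) (by omega) hs hc
  rw [lusList, List.range_eq_range']
  exact this

theorem lus_le20 (l : List Char) : lusList l ≤ 20 := by
  obtain ⟨⟨p, q, _, _, _, hval⟩, _⟩ := lus_spec l
  omega


theorem lus_compl_of (l : List Char) {p q : Nat} (h1 : p ≤ q) (h2 : q ≤ l.length)
    (h3 : (seg l p q).Nodup) : min 20 (q - p) ≤ lusList l :=
  (lus_spec l).2 p q h1 h2 h3

-- every achievable pair value is achieved by a pair that is a single block (c = d)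
-- or genuinely separated with both blocks nonempty
theorem okPair_single (l : List Char) {p q : Nat} (h1 : p ≤ q) (h2 : q ≤ l.length)
    (h3 : (seg l p q).Nodup) : okPair l p q q q := by
  refine ⟨h1, le_rfl, le_rfl, h2, h3, ?_, ?_⟩
  · rw [seg_nil l le_rfl]
    exact List.nodup_nil
  · intro x _ hx2
    rw [seg_nil l le_rfl] at hx2
    exact absurd hx2 (List.not_mem_nil)

theorem Sd_norm (l : List Char) (v : Nat) (h : Sd l v) :
    ∃ a b c d, okPair l a b c d ∧ v = (b - a) + (d - c) ∧
      (c = d ∨ (a < b ∧ b < c ∧ c < d)) := by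
  obtain ⟨a, b, c, d, hok, hval⟩ := h
  obtain ⟨h1, h2, h3, h4, nd1, nd2, disj⟩ := hok
  by_cases hcd : c = d
  · exact ⟨a, b, c, d, ⟨h1, h2, h3, h4, nd1, nd2, disj⟩, hval, Or.inl hcd⟩
  by_cases hab : a = b
  · exact ⟨c, d, d, d, okPair_single l h3 h4 nd2, by omega, Or.inl rfl⟩
  by_cases hbc : b = c
  · have hnd : (seg l a d).Nodup := by
      rw [seg_split l h1 (by omega) h4, List.nodup_append]
      refine ⟨nd1, by rw [hbc]; exact nd2, ?_⟩
      intro x hx y hy hEq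
      subst hbc
      exact disj x hx (by rw [hEq]; exact hy)
    exact ⟨a, d, d, d, okPair_single l (by omega) h4 hnd, by omega, Or.inl rfl⟩
  · exact ⟨a, b, c, d, ⟨h1, h2, h3, h4, nd1, nd2, disj⟩, hval,
      Or.inr ⟨by omega, by omega, by omega⟩⟩

-- ---------- segments inside take / drop / seg, and the surgery string ----------
theorem seg_take {α : Type} (l : List α) {p q i : Nat} (h : q ≤ i) :
    seg (l.take i) p q = seg l p q := by
  rw [seg, List.take_take, Nat.min_eq_left h]
  rfl

theorem seg_drop {α : Type} (l : List α) (m x y : Nat) :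
    seg (l.drop m) x y = seg l (m + x) (m + y) := by
  have h1 : (l.drop m).take y = (l.take (m + y)).drop m := by
    rw [List.drop_take]
    congr 1
    omega
  rw [seg, h1, List.drop_drop, seg]

theorem seg_of_seg {α : Type} (l : List α) {b d : Nat} (x y : Nat) (h : b + y ≤ d) :
    seg (seg l b d) x y = seg l (b + x) (b + y) := by
  show seg ((l.take d).drop b) x y = _
  rw [seg_drop, seg_take l (by omega)]

theorem surgery_eq (l : List Char) (i j : Nat) :
    surgery l i j = (l.take i ++ (seg l i (j + 1)).reverse) ++ l.drop (j + 1) := rfl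

theorem surgery_length (l : List Char) {i j : Nat} (h1 : i ≤ j + 1) (h2 : j + 1 ≤ l.length) :
    (surgery l i j).length = l.length := by
  rw [surgery_eq]
  simp only [List.length_append, List.length_reverse, List.length_take,
    seg_length l h2, List.length_drop]
  omega

-- ---------- port A as a plain max-fold over all candidates ----------
def aStep (l : List Char) (m i : Nat) : Nat :=
  (List.range' (i + 1) (l.length - (i + 1))).foldl
    (fun m' j => max m' (lusList (surgery l i j))) m

def aFold (l : List Char) (is : List Nat) (m : Nat) : Nat := is.foldl (aStep l) m

def aVal (l : List Char) : Nat :=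
  if lusList l = 20 then 20 else aOuter l (List.range l.length) (lusList l)

theorem aStep_ge (l : List Char) (m i : Nat) : m ≤ aStep l m i :=
  foldl_max_ge_init _ _ m

theorem aStep_le20 (l : List Char) {m : Nat} (i : Nat) (hm : m ≤ 20) : aStep l m i ≤ 20 :=
  foldl_max_le _ _ m hm (fun _ _ => lus_le20 _)

theorem aFold_ge_init (l : List Char) : ∀ (is : List Nat) (m : Nat), m ≤ aFold l is m
  | [], _ => le_rfl
  | i :: is, m => le_trans (aStep_ge l m i) (aFold_ge_init l is _)

theorem aFold_le20 (l : List Char) : ∀ (is : List Nat) (m : Nat), m ≤ 20 → aFold l is m ≤ 20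
  | [], _, hm => hm
  | i :: is, m, hm => aFold_le20 l is _ (aStep_le20 l i hm)

theorem aFold_ge_elem (l : List Char) : ∀ (is : List Nat) (m i j : Nat), i ∈ is →
    j ∈ List.range' (i + 1) (l.length - (i + 1)) → lusList (surgery l i j) ≤ aFold l is m
  | i' :: is, m, i, j, hi, hj => by
    rcases List.mem_cons.mp hi with rfl | hi
    · have h1 := foldl_max_ge_elem (fun j => lusList (surgery l i j))
        (List.range' (i + 1) (l.length - (i + 1))) m j hj
      simp only [] at h1
      exact le_trans h1 (aFold_ge_init l is _)
    · exact aFold_ge_elem l is _ i j hi hj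

theorem aFold_eq_or (l : List Char) : ∀ (is : List Nat) (m : Nat),
    aFold l is m = m ∨ ∃ i ∈ is, ∃ j ∈ List.range' (i + 1) (l.length - (i + 1)),
      aFold l is m = lusList (surgery l i j)
  | [], m => Or.inl rfl
  | i :: is, m => by
    rcases aFold_eq_or l is (aStep l m i) with h | ⟨i', hi', j', hj', h⟩
    · rcases foldl_max_eq_or (fun j => lusList (surgery l i j))
        (List.range' (i + 1) (l.length - (i + 1))) m with h2 | ⟨j, hj, h2⟩
      · refine Or.inl ?_
        rw [aFold, List.foldl_cons]
        show aFold l is (aStep l m i) = m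
        rw [h]
        simpa using h2
      · refine Or.inr ⟨i, by simp, j, hj, ?_⟩
        rw [aFold, List.foldl_cons]
        show aFold l is (aStep l m i) = _
        rw [h]
        simpa using h2
    · exact Or.inr ⟨i', by simp [hi'], j', hj', h⟩

theorem aInner_eq (l : List Char) (i : Nat) : ∀ (js : List Nat) (maxlen : Nat), maxlen ≤ 20 →
    aInner l i js maxlen = js.foldl (fun m' j => max m' (lusList (surgery l i j))) maxlen
  | [], m, _ => rfl
  | j :: js, m, hm => by
    simp only [aInner, List.foldl_cons]
    by_cases h20 : max m (lusList (surgery l i j)) = 20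
    · rw [if_pos h20]
      have hge := foldl_max_ge_init (fun j => lusList (surgery l i j)) js
        (max m (lusList (surgery l i j)))
      have hle := foldl_max_le (fun j => lusList (surgery l i j)) js
        (max m (lusList (surgery l i j))) (le_of_eq h20) (fun _ _ => lus_le20 _)
      simp only [] at hge hle
      omega
    · rw [if_neg h20]
      exact aInner_eq l i js _ (max_le hm (lus_le20 _))

theorem aOuter_eq (l : List Char) : ∀ (is : List Nat) (maxlen : Nat), maxlen ≤ 20 →
    aOuter l is maxlen = aFold l is maxlen
  | [], _, _ => rfl
  | i :: is, m, hm => by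
    simp only [aOuter, aFold, List.foldl_cons]
    rw [aInner_eq l i _ m hm]
    have hstep : (List.range' (i + 1) (l.length - (i + 1))).foldl
        (fun m' j => max m' (lusList (surgery l i j))) m = aStep l m i := rfl
    rw [hstep]
    by_cases h20 : aStep l m i = 20
    · rw [if_pos h20]
      have hge := aFold_ge_init l is (aStep l m i)
      have hle := aFold_le20 l is (aStep l m i) (le_of_eq h20)
      rw [aFold] at hge hle
      omega
    · rw [if_neg h20]
      exact aOuter_eq l is _ (aStep_le20 l i hm)

theorem aVal_eq (l : List Char) : aVal l = aFold l (List.range l.length) (lusList l) := by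
  rw [aVal]
  by_cases h20 : lusList l = 20
  · rw [if_pos h20]
    have hge := aFold_ge_init l (List.range l.length) (lusList l)
    have hle := aFold_le20 l (List.range l.length) (lusList l) (le_of_eq h20)
    omega
  · rw [if_neg h20]
    exact aOuter_eq l _ _ (lus_le20 l)

-- ---------- every distinct window of a block-reversed string is a disjoint pair of l ----------
theorem surgery_window_Sd (l : List Char) {i j p q : Nat} (hij : i < j) (hjn : j < l.length)
    (hpq : p ≤ q) (hqn : q ≤ l.length)
    (hnd : (seg (surgery l i j) p q).Nodup) : Sd l (q - p) := by
  have hj1 : j + 1 ≤ l.length := by omega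
  have hi : i ≤ l.length := by omega
  have hu : (l.take i).length = i := by simp [List.length_take]; omega
  have hv : (seg l i (j + 1)).length = j + 1 - i := seg_length l hj1
  have hrl : (seg l i (j + 1)).reverse.length = j + 1 - i := by rw [List.length_reverse, hv]
  have hX : (l.take i ++ (seg l i (j + 1)).reverse).length = j + 1 := by
    rw [List.length_append, hu, hrl]
    omega
  rw [surgery_eq] at hnd
  by_cases hq1 : q ≤ j + 1
  · rw [seg_append_left _ _ (by rw [hX]; omega)] at hnd
    by_cases hqi : q ≤ i
    · -- entirely inside the untouched prefix
      rw [seg_append_left _ _ (by rw [hu]; omega), seg_take l hqi] at hnd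
      exact Sd_single l hpq (by omega) hnd
    by_cases hpi : p < i
    · -- crosses the left edge of the reversed block
      rw [seg_append_mid _ _ (by rw [hu]; omega) (by rw [hu]; omega)
          (by rw [hu, hrl]; omega), hu, seg_take l le_rfl,
        seg_reverse _ (by omega) (by rw [hv]; omega), hv,
        seg_of_seg l _ _ (by omega),
        show i + (j + 1 - i - (q - i)) = j + 1 - (q - i) by omega,
        show i + (j + 1 - i - 0) = j + 1 by omega] at hnd
      obtain ⟨nd1, nd2r, disj⟩ := List.nodup_append.mp hnd
      refine ⟨p, i, j + 1 - (q - i), j + 1,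
        ⟨by omega, by omega, by omega, by omega, nd1, List.nodup_reverse.mp nd2r, ?_⟩,
        by omega⟩
      intro x hx hx2
      exact disj _ hx _ (List.mem_reverse.mpr hx2) rfl
    · -- entirely inside the reversed block
      rw [seg_append_right _ _ (by rw [hu]; omega), hu,
        seg_reverse _ (by omega) (by rw [hv]; omega), hv,
        seg_of_seg l _ _ (by omega),
        show i + (j + 1 - i - (q - i)) = j + 1 - (q - i) by omega,
        show i + (j + 1 - i - (p - i)) = j + 1 - (p - i) by omega] at hnd
      have hnd2 := List.nodup_reverse.mp hnd
      have hS := Sd_single l (p := j + 1 - (q - i)) (q := j + 1 - (p - i))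
        (by omega) (by omega) hnd2
      rw [show j + 1 - (p - i) - (j + 1 - (q - i)) = q - p by omega] at hS
      exact hS
  by_cases hpj : j + 1 ≤ p
  · -- entirely inside the untouched suffix
    rw [seg_append_right _ _ (by rw [hX]; omega), hX, seg_drop,
      show j + 1 + (p - (j + 1)) = p by omega,
      show j + 1 + (q - (j + 1)) = q by omega] at hnd
    exact Sd_single l hpq hqn hnd
  by_cases hpi : p < i
  · -- spans the whole reversed block: the window is a permutation of l[p:q]
    rw [seg_append_mid _ _ (by rw [hX]; omega) (by rw [hX]; omega)
        (by rw [hX, List.length_drop]; omega), hX,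
      seg_append_mid _ _ (by rw [hu]; omega) (by rw [hu]; omega) (by rw [hu, hrl]; omega),
      hu, seg_take l le_rfl, seg_drop,
      show j + 1 + 0 = j + 1 by omega,
      show j + 1 + (q - (j + 1)) = q by omega] at hnd
    have hfull : seg (seg l i (j + 1)).reverse 0 (j + 1 - i) = (seg l i (j + 1)).reverse := by
      have h := seg_zero_length (seg l i (j + 1)).reverse
      rw [hrl] at h
      exact h
    rw [hfull] at hnd
    have hperm : List.Perm ((seg l p i ++ (seg l i (j + 1)).reverse) ++ seg l (j + 1) q)
        ((seg l p i ++ seg l i (j + 1)) ++ seg l (j + 1) q) :=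
      List.Perm.append_right _ (List.Perm.append_left _ (seg l i (j + 1)).reverse_perm)
    have hnd2 := hperm.nodup hnd
    have hsp : seg l p q = (seg l p i ++ seg l i (j + 1)) ++ seg l (j + 1) q := by
      rw [seg_split l (show p ≤ j + 1 by omega) (show j + 1 ≤ q by omega) hqn,
        seg_split l (show p ≤ i by omega) (show i ≤ j + 1 by omega) hj1]
    rw [← hsp] at hnd2
    exact Sd_single l hpq hqn hnd2
  · -- crosses the right edge of the reversed block
    rw [seg_append_mid _ _ (by rw [hX]; omega) (by rw [hX]; omega)
        (by rw [hX, List.length_drop]; omega), hX,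
      seg_append_right _ _ (by rw [hu]; omega), hu,
      seg_reverse _ (by omega) (by rw [hv]), hv,
      seg_of_seg l _ _ (by omega), seg_drop,
      show i + (j + 1 - i - (j + 1 - i)) = i by omega,
      show i + (j + 1 - i - (p - i)) = i + (j + 1 - p) by omega,
      show j + 1 + 0 = j + 1 by omega,
      show j + 1 + (q - (j + 1)) = q by omega] at hnd
    obtain ⟨nd1r, nd2, disj⟩ := List.nodup_append.mp hnd
    refine ⟨i, i + (j + 1 - p), j + 1, q,
      ⟨by omega, by omega, by omega, by omega, List.nodup_reverse.mp nd1r, nd2, ?_⟩,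
      by omega⟩
    intro x hx hx2
    exact disj _ (List.mem_reverse.mpr hx) _ hx2 rfl

-- ---------- conversely: a separated pair is a window of one block-reversed string ----------
theorem pair_le_lus_surgery (l : List Char) {a b c d : Nat} (hok : okPair l a b c d)
    (hbc : b < c) (hcd : c < d) :
    min 20 ((b - a) + (d - c)) ≤ lusList (surgery l b (d - 1)) := by
  obtain ⟨h1, h2, h3, h4, nd1, nd2, disj⟩ := hok
  have hd1 : d - 1 + 1 = d := by omega
  have hu : (l.take b).length = b := by simp [List.length_take]; omega
  have hv : (seg l b d).length = d - b := seg_length l h4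
  have hrl : (seg l b d).reverse.length = d - b := by rw [List.length_reverse, hv]
  have hX : (l.take b ++ (seg l b d).reverse).length = d := by
    rw [List.length_append, hu, hrl]
    omega
  have hwin : seg (surgery l b (d - 1)) a (b + (d - c)) = seg l a b ++ (seg l c d).reverse := by
    rw [surgery_eq, hd1,
      seg_append_left _ _ (by rw [hX]; omega),
      seg_append_mid _ _ (by rw [hu]; omega) (by rw [hu]; omega) (by rw [hu, hrl]; omega),
      hu, seg_take l le_rfl,
      show b + (d - c) - b = d - c by omega,
      seg_reverse _ (by omega) (by rw [hv]; omega), hv,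
      seg_of_seg l _ _ (by omega),
      show b + (d - b - (d - c)) = c by omega,
      show b + (d - b - 0) = d by omega]
  have hndw : (seg (surgery l b (d - 1)) a (b + (d - c))).Nodup := by
    rw [hwin, List.nodup_append]
    refine ⟨nd1, List.nodup_reverse.mpr nd2, ?_⟩
    intro x hx y hy hEq
    exact disj x hx (by rw [hEq]; exact List.mem_reverse.mp hy)
  have hlen : (surgery l b (d - 1)).length = l.length := by
    have := surgery_length l (i := b) (j := d - 1) (by omega) (by omega)
    exact this
  have hc := lus_compl_of (surgery l b (d - 1)) (p := a) (q := b + (d - c)) (by omega)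
    (by rw [hlen]; omega) hndw
  rw [show b + (d - c) - a = (b - a) + (d - c) by omega] at hc
  exact hc

-- ---------- soundness / completeness of port A against Sd ----------
theorem A_sound (l : List Char) : ∃ v, Sd l v ∧ aVal l = min 20 v := by
  rw [aVal_eq]
  rcases aFold_eq_or l (List.range l.length) (lusList l) with h | ⟨i, hi, j, hj, h⟩
  · obtain ⟨⟨p, q, hp, hq, hn, hval⟩, _⟩ := lus_spec l
    exact ⟨q - p, Sd_single l hp hq hn, by rw [h, hval]⟩
  · have hi' : i < l.length := List.mem_range.mp hi
    have hj' : i + 1 ≤ j ∧ j < i + 1 + (l.length - (i + 1)) := List.mem_range'_1.mp hj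
    have hjn : j < l.length := by omega
    have hlen : (surgery l i j).length = l.length := surgery_length l (by omega) (by omega)
    obtain ⟨⟨p, q, hp, hq, hn, hval⟩, _⟩ := lus_spec (surgery l i j)
    rw [hlen] at hq
    exact ⟨q - p, surgery_window_Sd l (by omega) hjn hp hq hn, by rw [h, hval]⟩

theorem A_compl (l : List Char) : ∀ v, Sd l v → min 20 v ≤ aVal l := by
  intro v hv
  obtain ⟨a, b, c, d, hok, hval, hnorm⟩ := Sd_norm l v hv
  rw [aVal_eq]
  rcases hnorm with rfl | ⟨hab, hbc, hcd⟩
  · -- a single distinct block: already counted by the initial longest_unique_substring(s)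
    obtain ⟨h1, h2, h3, h4, nd1, _, _⟩ := hok
    have := lus_compl_of l (p := a) (q := b) h1 (by omega) nd1
    have hinit := aFold_ge_init l (List.range l.length) (lusList l)
    omega
  · have hle := pair_le_lus_surgery l hok hbc hcd
    obtain ⟨h1, h2, h3, h4, _, _, _⟩ := hok
    have hmem : lusList (surgery l b (d - 1)) ≤ aFold l (List.range l.length) (lusList l) :=
      aFold_ge_elem l (List.range l.length) (lusList l) b (d - 1)
        (List.mem_range.mpr (by omega))
        (List.mem_range'_1.mpr ⟨by omega, by omega⟩)
    omega


-- ---------- port B: the greedy run from c avoiding `used` ----------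
theorem bRun_spec (l : List Char) (c : Nat) (used : PySem.Set Char) :
    ∀ (fuel run : Nat) (seen : PySem.Set Char), c + run ≤ l.length →
    l.length - (c + run) ≤ fuel →
    (∀ x, x ∈ seen ↔ (x ∈ used ∨ x ∈ seg l c (c + run))) →
    (seg l c (c + run)).Nodup →
    (∀ x ∈ seg l c (c + run), x ∉ used) →
    ∃ r, bRun l c seen run fuel = r ∧ run ≤ r ∧ c + r ≤ l.length ∧
      (seg l c (c + r)).Nodup ∧ (∀ x ∈ seg l c (c + r), x ∉ used) ∧
      (c + r = l.length ∨
        ∃ h : c + r < l.length, l[c + r] ∈ used ∨ l[c + r] ∈ seg l c (c + r)) := by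
  intro fuel
  induction fuel with
  | zero =>
    intro run seen hle hf hmem hnd hdisj
    exact ⟨run, rfl, le_rfl, hle, hnd, hdisj, Or.inl (by omega)⟩
  | succ fuel ih =>
    intro run seen hle hf hmem hnd hdisj
    by_cases hlt : c + run < l.length
    · have hgd : l.getD (c + run) ' ' = l[c + run] := List.getD_eq_getElem l ' ' hlt
      by_cases hc : PySem.Set.contains seen (l.getD (c + run) ' ') = true
      · refine ⟨run, ?_, le_rfl, hle, hnd, hdisj, Or.inr ⟨hlt, ?_⟩⟩
        · rw [bRun, if_pos hlt, if_pos hc]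
        · have := (hmem _).mp ((PySem.Set.contains_iff _ _).mp hc)
          rw [hgd] at this
          exact this
      · have hnotin : l[c + run] ∉ seen := by
          intro hin
          exact hc ((PySem.Set.contains_iff _ _).mpr (by rw [hgd]; exact hin))
        have hni : l[c + run] ∉ used ∧ l[c + run] ∉ seg l c (c + run) := by
          constructor <;> (intro hx; exact hnotin ((hmem _).mpr (by first | exact Or.inl hx | exact Or.inr hx)))
        have hsnoc : seg l c (c + run + 1) = seg l c (c + run) ++ [l[c + run]] :=
          seg_snoc l (by omega) hlt
        have hnd' : (seg l c (c + run + 1)).Nodup := by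
          rw [hsnoc, List.nodup_append]
          refine ⟨hnd, List.nodup_singleton _, ?_⟩
          intro x hx y hy hEq
          rw [List.mem_singleton] at hy
          subst hy
          exact hni.2 (hEq ▸ hx)
        have hmem' : ∀ x, x ∈ PySem.Set.add seen (l.getD (c + run) ' ') ↔
            (x ∈ used ∨ x ∈ seg l c (c + run + 1)) := by
          intro x
          rw [PySem.Set.mem_add, hgd, hsnoc, hmem]
          simp only [List.mem_append, List.mem_singleton]
          tauto
        have hdisj' : ∀ x ∈ seg l c (c + run + 1), x ∉ used := by
          intro x hx
          rw [hsnoc, List.mem_append, List.mem_singleton] at hx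
          rcases hx with hx | rfl
          · exact hdisj x hx
          · exact hni.1
        obtain ⟨r, heq, hr1, hr2, hr3, hr4, hr5⟩ :=
          ih (run + 1) (PySem.Set.add seen (l.getD (c + run) ' ')) (by omega) (by omega)
            hmem' hnd' hdisj'
        refine ⟨r, ?_, by omega, hr2, hr3, hr4, hr5⟩
        rw [bRun, if_pos hlt, if_neg hc]
        exact heq
    · refine ⟨run, ?_, le_rfl, hle, hnd, hdisj, Or.inl (by omega)⟩
      rw [bRun, if_neg hlt]

theorem bRun_full (l : List Char) (c : Nat) (used : PySem.Set Char) (hc : c ≤ l.length) :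
    ∃ r, bRun l c used 0 (l.length - c) = r ∧ c + r ≤ l.length ∧
      (seg l c (c + r)).Nodup ∧ (∀ x ∈ seg l c (c + r), x ∉ used) ∧
      (c + r = l.length ∨
        ∃ h : c + r < l.length, l[c + r] ∈ used ∨ l[c + r] ∈ seg l c (c + r)) := by
  have h0 : seg l c (c + 0) = [] := seg_nil l (by omega)
  obtain ⟨r, heq, _, h2, h3, h4, h5⟩ := bRun_spec l c used (l.length - c) 0 used (by omega)
    (by omega) (by intro x; rw [h0]; simp) (by rw [h0]; exact List.nodup_nil)
    (by intro x hx; rw [h0] at hx; exact absurd hx (List.not_mem_nil))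
  exact ⟨r, heq, h2, h3, h4, h5⟩

theorem run_maximal (l : List Char) (c : Nat) (used : PySem.Set Char) {r d : Nat}
    (hmax : c + r = l.length ∨
      ∃ h : c + r < l.length, l[c + r] ∈ used ∨ l[c + r] ∈ seg l c (c + r))
    (hd1 : c ≤ d) (hd2 : d ≤ l.length) (hdn : (seg l c d).Nodup)
    (hdisj : ∀ x ∈ seg l c d, x ∉ used) : d - c ≤ r := by
  by_contra h
  have hlt : c + r < d := by omega
  rcases hmax with he | ⟨hh, hcase⟩
  · omega
  have hmem : l[c + r] ∈ seg l c d := getElem_mem_seg l (by omega) (by omega) hd2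
  rcases hcase with hused | hseg
  · exact hdisj _ hmem hused
  · have hnd2 : (seg l c (c + r + 1)).Nodup := nodup_seg_mono l le_rfl (by omega) hd2 hdn
    rw [seg_snoc l (by omega) (by omega)] at hnd2
    obtain ⟨_, _, disj2⟩ := List.nodup_append.mp hnd2
    exact disj2 _ hseg _ (by simp) rfl

-- ---------- the inner c-loop of B as a capped max-fold ----------
theorem bPair_eq (l : List Char) (len1 : Nat) (used : PySem.Set Char) :
    ∀ (cs : List Nat) (best : Nat), best < 20 →
    bPair l len1 used cs best =
      min 20 (cs.foldl (fun m c => max m (len1 + bRun l c used 0 (l.length - c))) best) := by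
  intro cs
  induction cs with
  | nil =>
    intro best hb
    simp only [bPair, List.foldl_nil]
    omega
  | cons c cs ih =>
    intro best hb
    simp only [bPair, List.foldl_cons]
    have hmax : (if len1 + bRun l c used 0 (l.length - c) > best
        then len1 + bRun l c used 0 (l.length - c) else best)
        = max best (len1 + bRun l c used 0 (l.length - c)) := by
      split <;> omega
    rw [hmax]
    by_cases h20 : 20 ≤ max best (len1 + bRun l c used 0 (l.length - c))
    · rw [if_pos h20]
      have hge := foldl_max_ge_init (fun c => len1 + bRun l c used 0 (l.length - c)) cs
        (max best (len1 + bRun l c used 0 (l.length - c)))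
      simp only [] at hge
      omega
    · rw [if_neg h20]
      exact ih _ (by omega)

-- ---------- the extension loop of B ----------
theorem bExtend_ge (l : List Char) (a : Nat) : ∀ (fuel : Nat) (used : PySem.Set Char)
    (b best : Nat), best < 20 → best ≤ bExtend l a used b best fuel := by
  intro fuel
  induction fuel with
  | zero => intro used b best _; exact le_rfl
  | succ fuel ih =>
    intro used b best hb
    rw [bExtend]
    by_cases hbn : b < l.length
    · rw [if_pos hbn]
      by_cases hc : PySem.Set.contains used (l.getD b ' ') = true
      · rw [if_pos hc]
      · rw [if_neg hc]
        simp only []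
        by_cases h20a : 20 ≤ (if b + 1 - a > best then b + 1 - a else best)
        · rw [if_pos h20a]
          omega
        · rw [if_neg h20a]
          have hb1 : (if b + 1 - a > best then b + 1 - a else best) < 20 := by omega
          have hbe := bPair_eq l (b + 1 - a) (PySem.Set.add used (l.getD b ' '))
            (List.range' (b + 1) (l.length - (b + 1)))
            (if b + 1 - a > best then b + 1 - a else best) hb1
          have hge := foldl_max_ge_init
            (fun c => (b + 1 - a) + bRun l c (PySem.Set.add used (l.getD b ' ')) 0 (l.length - c))
            (List.range' (b + 1) (l.length - (b + 1)))
            (if b + 1 - a > best then b + 1 - a else best)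
          simp only [] at hge
          have hbf : best ≤ (if b + 1 - a > best then b + 1 - a else best) := by
            split <;> omega
          have hbb : (if b + 1 - a > best then b + 1 - a else best)
              ≤ bPair l (b + 1 - a) (PySem.Set.add used (l.getD b ' '))
                (List.range' (b + 1) (l.length - (b + 1)))
                (if b + 1 - a > best then b + 1 - a else best) := by
            rw [hbe]
            omega
          by_cases h20b : bPair l (b + 1 - a) (PySem.Set.add used (l.getD b ' '))
              (List.range' (b + 1) (l.length - (b + 1)))
              (if b + 1 - a > best then b + 1 - a else best) = 20
          · rw [if_pos h20b]
            omega
          · rw [if_neg h20b]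
            have := ih (PySem.Set.add used (l.getD b ' ')) (b + 1)
              (bPair l (b + 1 - a) (PySem.Set.add used (l.getD b ' '))
                (List.range' (b + 1) (l.length - (b + 1)))
                (if b + 1 - a > best then b + 1 - a else best)) (by omega)
            omega
    · rw [if_neg hbn]

theorem bExtend_sound (l : List Char) (a : Nat) : ∀ (fuel : Nat) (used : PySem.Set Char)
    (b best : Nat), a ≤ b → b ≤ l.length → l.length - b ≤ fuel →
    (∀ x, x ∈ used ↔ x ∈ seg l a b) → (seg l a b).Nodup → best < 20 →
    (bExtend l a used b best fuel = best ∨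
      ∃ v, Sd l v ∧ bExtend l a used b best fuel = min 20 v) := by
  intro fuel
  induction fuel with
  | zero => intro used b best _ _ _ _ _ _; exact Or.inl rfl
  | succ fuel ih =>
    intro used b best hab hbl hf hmem hnd hb20
    rw [bExtend]
    by_cases hbn : b < l.length
    · rw [if_pos hbn]
      have hgd : l.getD b ' ' = l[b] := List.getD_eq_getElem l ' ' hbn
      by_cases hc : PySem.Set.contains used (l.getD b ' ') = true
      · rw [if_pos hc]
        exact Or.inl rfl
      · rw [if_neg hc]
        simp only []
        have hch : l[b] ∉ seg l a b := by
          intro hx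
          exact hc ((PySem.Set.contains_iff _ _).mpr (by rw [hgd]; exact (hmem _).mpr hx))
        have hsnoc : seg l a (b + 1) = seg l a b ++ [l[b]] := seg_snoc l hab hbn
        have hnd1 : (seg l a (b + 1)).Nodup := by
          rw [hsnoc, List.nodup_append]
          refine ⟨hnd, List.nodup_singleton _, ?_⟩
          intro x hx y hy hEq
          rw [List.mem_singleton] at hy
          subst hy
          exact hch (hEq ▸ hx)
        have hmem1 : ∀ x, x ∈ PySem.Set.add used (l.getD b ' ') ↔ x ∈ seg l a (b + 1) := by
          intro x
          rw [PySem.Set.mem_add, hgd, hsnoc, hmem]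
          simp
        have hSd1 : Sd l (b + 1 - a) := Sd_single l (by omega) (by omega) hnd1
        by_cases h20a : 20 ≤ (if b + 1 - a > best then b + 1 - a else best)
        · rw [if_pos h20a]
          refine Or.inr ⟨b + 1 - a, hSd1, ?_⟩
          have : b + 1 - a ≥ 20 := by
            by_cases h : b + 1 - a > best <;> simp [h] at h20a <;> omega
          omega
        · rw [if_neg h20a]
          have hb1 : (if b + 1 - a > best then b + 1 - a else best) < 20 := by omega
          have hbe := bPair_eq l (b + 1 - a) (PySem.Set.add used (l.getD b ' '))
            (List.range' (b + 1) (l.length - (b + 1)))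
            (if b + 1 - a > best then b + 1 - a else best) hb1
          -- every candidate of the inner fold is an achievable pair value
          have hSdc : ∀ c ∈ List.range' (b + 1) (l.length - (b + 1)),
              Sd l ((b + 1 - a) + bRun l c (PySem.Set.add used (l.getD b ' ')) 0 (l.length - c)) := by
            intro c hcm
            have hcr := List.mem_range'_1.mp hcm
            obtain ⟨r, heq, hr2, hr3, hr4, _⟩ :=
              bRun_full l c (PySem.Set.add used (l.getD b ' ')) (by omega)
            rw [heq]
            refine ⟨a, b + 1, c, c + r, ⟨by omega, by omega, by omega, hr2, hnd1, hr3, ?_⟩, by omega⟩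
            intro x hx hx2
            exact hr4 x hx2 ((hmem1 x).mpr hx)
          rcases foldl_max_eq_or
              (fun c => (b + 1 - a) + bRun l c (PySem.Set.add used (l.getD b ' ')) 0 (l.length - c))
              (List.range' (b + 1) (l.length - (b + 1)))
              (if b + 1 - a > best then b + 1 - a else best) with hF | ⟨cw, hcw, hF⟩
          -- the value the inner fold returns
          · -- fold returned its initial value
            rw [hbe, hF]
            have hbmin : min 20 (if b + 1 - a > best then b + 1 - a else best)
                = (if b + 1 - a > best then b + 1 - a else best) := by omega
            rw [hbmin]
            by_cases h20b : (if b + 1 - a > best then b + 1 - a else best) = 20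
            · omega
            · rw [if_neg h20b]
              rcases ih (PySem.Set.add used (l.getD b ' ')) (b + 1)
                  (if b + 1 - a > best then b + 1 - a else best) (by omega) (by omega)
                  (by omega) hmem1 hnd1 (by omega) with hr | ⟨v, hv, hr⟩
              · rw [hr]
                by_cases hupd : b + 1 - a > best
                · rw [if_pos hupd]
                  refine Or.inr ⟨b + 1 - a, hSd1, ?_⟩
                  rw [if_pos hupd] at hb1
                  omega
                · rw [if_neg hupd]
                  exact Or.inl rfl
              · exact Or.inr ⟨v, hv, hr⟩
          · -- fold returned one of the pair candidates
            rw [hbe, hF]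
            have hSdw := hSdc cw hcw
            by_cases h20b : min 20 ((b + 1 - a) +
                bRun l cw (PySem.Set.add used (l.getD b ' ')) 0 (l.length - cw)) = 20
            · rw [if_pos h20b]
              exact Or.inr ⟨_, hSdw, by omega⟩
            · rw [if_neg h20b]
              rcases ih (PySem.Set.add used (l.getD b ' ')) (b + 1)
                  (min 20 ((b + 1 - a) +
                    bRun l cw (PySem.Set.add used (l.getD b ' ')) 0 (l.length - cw)))
                  (by omega) (by omega) (by omega) hmem1 hnd1 (by omega) with hr | ⟨v, hv, hr⟩
              · rw [hr]
                exact Or.inr ⟨_, hSdw, rfl⟩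
              · exact Or.inr ⟨v, hv, hr⟩
    · rw [if_neg hbn]
      exact Or.inl rfl

theorem bExtend_compl (l : List Char) (a : Nat) : ∀ (fuel : Nat) (used : PySem.Set Char)
    (b best : Nat), a ≤ b → b ≤ l.length → l.length - b ≤ fuel →
    (∀ x, x ∈ used ↔ x ∈ seg l a b) → best < 20 →
    (∀ b' c d, okPair l a b' c d → (c = d ∨ (a < b' ∧ b' < c ∧ c < d)) → b' ≤ b →
      min 20 ((b' - a) + (d - c)) ≤ best) →
    ∀ b' c d, okPair l a b' c d → (c = d ∨ (a < b' ∧ b' < c ∧ c < d)) →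
      min 20 ((b' - a) + (d - c)) ≤ bExtend l a used b best fuel := by
  intro fuel
  induction fuel with
  | zero =>
    intro used b best hab hbl hf hmem hb20 hprev b' c d hok hnorm
    exact hprev b' c d hok hnorm (by obtain ⟨_, h2, h3, h4, _⟩ := hok; omega)
  | succ fuel ih =>
    intro used b best hab hbl hf hmem hb20 hprev b' c d hok hnorm
    by_cases hble : b' ≤ b
    · exact le_trans (hprev b' c d hok hnorm hble) (bExtend_ge l a (fuel + 1) used b best hb20)
    · -- the extension loop cannot stop before reaching b'
      have hnd' : (seg l a b').Nodup := hok.2.2.2.2.1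
      have hbb' : b < b' := by omega
      have hbn : b < l.length := by
        obtain ⟨_, h2, h3, h4, _⟩ := hok
        omega
      have hgd : l.getD b ' ' = l[b] := List.getD_eq_getElem l ' ' hbn
      have hndb1 : (seg l a (b + 1)).Nodup := nodup_seg_mono l le_rfl (by omega)
        (by obtain ⟨_, h2, h3, h4, _⟩ := hok; omega) hnd'
      have hch : l[b] ∉ seg l a b := by
        intro hx
        rw [seg_snoc l hab hbn, List.nodup_append] at hndb1
        exact hndb1.2.2 _ hx _ (by simp) rfl
      have hcf : ¬ PySem.Set.contains used (l.getD b ' ') = true := by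
        intro hc
        exact hch ((hmem _).mp ((PySem.Set.contains_iff _ _).mp (by rw [← hgd]; exact hc)))
      rw [bExtend, if_pos hbn, if_neg hcf]
      simp only []
      have hmem1 : ∀ x, x ∈ PySem.Set.add used (l.getD b ' ') ↔ x ∈ seg l a (b + 1) := by
        intro x
        rw [PySem.Set.mem_add, hgd, seg_snoc l hab hbn, hmem]
        simp
      by_cases h20a : 20 ≤ (if b + 1 - a > best then b + 1 - a else best)
      · rw [if_pos h20a]
        omega
      · rw [if_neg h20a]
        have hb1 : (if b + 1 - a > best then b + 1 - a else best) < 20 := by omega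
        have hbe := bPair_eq l (b + 1 - a) (PySem.Set.add used (l.getD b ' '))
          (List.range' (b + 1) (l.length - (b + 1)))
          (if b + 1 - a > best then b + 1 - a else best) hb1
        have hgef := foldl_max_ge_init
          (fun c => (b + 1 - a) + bRun l c (PySem.Set.add used (l.getD b ' ')) 0 (l.length - c))
          (List.range' (b + 1) (l.length - (b + 1)))
          (if b + 1 - a > best then b + 1 - a else best)
        simp only [] at hgef
        have hbf : best ≤ (if b + 1 - a > best then b + 1 - a else best) := by
          split <;> omega
        have hprev1 : ∀ b'' c'' d'', okPair l a b'' c'' d'' →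
            (c'' = d'' ∨ (a < b'' ∧ b'' < c'' ∧ c'' < d'')) → b'' ≤ b + 1 →
            min 20 ((b'' - a) + (d'' - c'')) ≤ bPair l (b + 1 - a)
              (PySem.Set.add used (l.getD b ' '))
              (List.range' (b + 1) (l.length - (b + 1)))
              (if b + 1 - a > best then b + 1 - a else best) := by
          intro b'' c'' d'' hok2 hnorm2 hble2
          rw [hbe]
          by_cases hb2 : b'' ≤ b
          · have := hprev b'' c'' d'' hok2 hnorm2 hb2
            omega
          · have hbeq : b'' = b + 1 := by omega
            subst hbeq
            rcases hnorm2 with rfl | ⟨_, hbc2, hcd2⟩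
            · -- single block ending exactly at b+1: it is the length1 update
              have : (b + 1 - a) + (c'' - c'') ≤ (if b + 1 - a > best then b + 1 - a else best) := by
                split <;> omega
              omega
            · -- genuine pair: its second block is found by the inner loop at c''
              obtain ⟨g1, g2, g3, g4, gn1, gn2, gdisj⟩ := hok2
              have hcm : c'' ∈ List.range' (b + 1) (l.length - (b + 1)) :=
                List.mem_range'_1.mpr ⟨by omega, by omega⟩
              have helem := foldl_max_ge_elem
                (fun c => (b + 1 - a) + bRun l c (PySem.Set.add used (l.getD b ' ')) 0 (l.length - c))
                (List.range' (b + 1) (l.length - (b + 1)))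
                (if b + 1 - a > best then b + 1 - a else best) c'' hcm
              simp only [] at helem
              obtain ⟨r, heq, hr2, hr3, hr4, hr5⟩ :=
                bRun_full l c'' (PySem.Set.add used (l.getD b ' ')) (by omega)
              have hrge : d'' - c'' ≤ r := by
                refine run_maximal l c'' (PySem.Set.add used (l.getD b ' ')) hr5 (by omega) g4 gn2 ?_
                intro x hx hx2
                exact gdisj x ((hmem1 x).mp hx2) hx
              rw [heq] at helem
              omega
        by_cases h20b : bPair l (b + 1 - a) (PySem.Set.add used (l.getD b ' '))
            (List.range' (b + 1) (l.length - (b + 1)))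
            (if b + 1 - a > best then b + 1 - a else best) = 20
        · rw [if_pos h20b]
          omega
        · rw [if_neg h20b]
          have hbp20 : bPair l (b + 1 - a) (PySem.Set.add used (l.getD b ' '))
              (List.range' (b + 1) (l.length - (b + 1)))
              (if b + 1 - a > best then b + 1 - a else best) < 20 := by
            rw [hbe]
            omega
          exact ih (PySem.Set.add used (l.getD b ' ')) (b + 1) _ (by omega) (by omega)
            (by omega) hmem1 hbp20 hprev1 b' c d hok hnorm

-- ---------- the outer loop of B ----------
theorem bOuter_sound (l : List Char) : ∀ (as_ : List Nat) (best : Nat), best < 20 →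
    (∀ a ∈ as_, a < l.length) →
    (bOuter l as_ best = best ∨ ∃ v, Sd l v ∧ bOuter l as_ best = min 20 v) := by
  intro as_
  induction as_ with
  | nil => intro best _ _; exact Or.inl rfl
  | cons a as_ ih =>
    intro best hb20 hmem
    have han : a < l.length := hmem a (by simp)
    have h0 : seg l a a = [] := seg_nil l le_rfl
    have hex := bExtend_sound l a (l.length - a) PySem.Set.empty a best le_rfl (by omega)
      (by omega) (by intro x; rw [h0]; simp [PySem.Set.empty])
      (by rw [h0]; exact List.nodup_nil) hb20
    rw [bOuter]
    rcases hex with he | ⟨v, hv, he⟩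
    · rw [he, if_neg (by omega)]
      exact ih best hb20 (fun x hx => hmem x (by simp [hx]))
    · rw [he]
      by_cases h20 : min 20 v = 20
      · rw [if_pos h20]
        exact Or.inr ⟨v, hv, by omega⟩
      · rw [if_neg h20]
        rcases ih (min 20 v) (by omega) (fun x hx => hmem x (by simp [hx])) with hr | ⟨w, hw, hr⟩
        · rw [hr]
          exact Or.inr ⟨v, hv, rfl⟩
        · exact Or.inr ⟨w, hw, hr⟩

theorem bOuter_compl (l : List Char) : ∀ (as_ : List Nat) (best : Nat), best < 20 →
    (∀ a ∈ as_, a < l.length) →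
    (∀ a b c d, okPair l a b c d → (c = d ∨ (a < b ∧ b < c ∧ c < d)) → a ∉ as_ →
      min 20 ((b - a) + (d - c)) ≤ best) →
    ∀ a b c d, okPair l a b c d → (c = d ∨ (a < b ∧ b < c ∧ c < d)) →
      min 20 ((b - a) + (d - c)) ≤ bOuter l as_ best := by
  intro as_
  induction as_ with
  | nil =>
    intro best _ _ hprev a b c d hok hnorm
    exact hprev a b c d hok hnorm (List.not_mem_nil)
  | cons a0 as_ ih =>
    intro best hb20 hmemr hprev a b c d hok hnorm
    have han : a0 < l.length := hmemr a0 (by simp)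
    have h0 : seg l a0 a0 = [] := seg_nil l le_rfl
    have hprev0 : ∀ b' c' d', okPair l a0 b' c' d' →
        (c' = d' ∨ (a0 < b' ∧ b' < c' ∧ c' < d')) → b' ≤ a0 →
        min 20 ((b' - a0) + (d' - c')) ≤ best := by
      intro b' c' d' hok2 hnorm2 hble
      have hx1 : b' = a0 := by
        obtain ⟨g1, _⟩ := hok2
        omega
      rcases hnorm2 with rfl | ⟨hg, _⟩
      · omega
      · omega
    have hcompl := bExtend_compl l a0 (l.length - a0) PySem.Set.empty a0 best le_rfl
      (by omega) (by omega) (by intro x; rw [h0]; simp [PySem.Set.empty]) hb20 hprev0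
    have hge := bExtend_ge l a0 (l.length - a0) PySem.Set.empty a0 best hb20
    rw [bOuter]
    by_cases h20 : bExtend l a0 PySem.Set.empty a0 best (l.length - a0) = 20
    · rw [if_pos h20]
      omega
    · rw [if_neg h20]
      have hext20 : bExtend l a0 PySem.Set.empty a0 best (l.length - a0) < 20 := by
        rcases bExtend_sound l a0 (l.length - a0) PySem.Set.empty a0 best le_rfl (by omega)
            (by omega) (by intro x; rw [h0]; simp [PySem.Set.empty])
            (by rw [h0]; exact List.nodup_nil) hb20 with he | ⟨v, _, he⟩
        · omega
        · rw [he] at h20 ⊢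
          omega
      refine ih (bExtend l a0 PySem.Set.empty a0 best (l.length - a0)) hext20
        (fun x hx => hmemr x (by simp [hx])) ?_ a b c d hok hnorm
      intro a' b' c' d' hok2 hnorm2 hnin
      by_cases ha' : a' = a0
      · subst ha'
        exact hcompl b' c' d' hok2 hnorm2
      · have : a' ∉ a0 :: as_ := by simp [ha', hnin]
        exact le_trans (hprev a' b' c' d' hok2 hnorm2 this) hge

-- ---------- port B's value ----------
def bVal (l : List Char) : Nat := min (bOuter l (List.range l.length) 0) 20

theorem B_sound (l : List Char) : ∃ v, Sd l v ∧ bVal l = min 20 v := by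
  rcases bOuter_sound l (List.range l.length) 0 (by omega)
      (fun a ha => List.mem_range.mp ha) with h | ⟨v, hv, h⟩
  · exact ⟨0, Sd_zero l, by rw [bVal, h]; omega⟩
  · exact ⟨v, hv, by rw [bVal, h]; omega⟩

theorem B_compl (l : List Char) : ∀ v, Sd l v → min 20 v ≤ bVal l := by
  intro v hv
  obtain ⟨a, b, c, d, hok, hval, hnorm⟩ := Sd_norm l v hv
  have hprev : ∀ a' b' c' d', okPair l a' b' c' d' →
      (c' = d' ∨ (a' < b' ∧ b' < c' ∧ c' < d')) → a' ∉ List.range l.length →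
      min 20 ((b' - a') + (d' - c')) ≤ 0 := by
    intro a' b' c' d' hok2 hnorm2 hnin
    rw [List.mem_range] at hnin
    obtain ⟨g1, g2, g3, g4, _⟩ := hok2
    rcases hnorm2 with rfl | ⟨hg, _⟩
    · omega
    · omega
  have := bOuter_compl l (List.range l.length) 0 (by omega)
    (fun a ha => List.mem_range.mp ha) hprev a b c d hok hnorm
  rw [bVal, hval]
  have hTle := this
  omega

-- ---------- the two programs agree ----------
theorem AB_eq (l : List Char) : aVal l = bVal l := by
  obtain ⟨va, hva, ha⟩ := A_sound l
  obtain ⟨vb, hvb, hb⟩ := B_sound l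
  have h1 := A_compl l vb hvb
  have h2 := B_compl l va hva
  omega

-- ===== VERDICT (by name: the statement is the Claim_ definition above) =====
theorem max_distinct_substring_spec : Claim_equal_max_distinct_substring := by
  intro s _
  unfold Spec_max_distinct_substring
  show ((aVal s.toList : Nat) : Int) = ((bVal s.toList : Nat) : Int)
  exact_mod_cast AB_eq s.toList
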